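-- pv_equiv track=rewrite | github.com/KishoreMayank/algorithms-python | Dropbox - AutoComplete Scores.py | autoCompleteScores
-- ===== SOURCE A (Python) =====
-- def autoCompleteScores(title,body,queries):
--     docTitles = [word for line in title for word in line.split()]
--     docBodies = [word for line in body for word in line.split()]
--     docBodyScore={i:docBodies.count(i) for i in docBodies}
--     docTitleScore={i:docTitles.count(i)*10 for i in docTitles}
--     docscore={k:docBodyScore.get(k,0)+docTitleScore.get(k,0) for k in set(docBodyScore)|set(docTitleScore)}
--     querysearch={}
--     scorecalc={}
--     for query in queries:
--         querysearch[query]=[]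
--         scorecalc[query]=[]
--     for query in querysearch:
--         for docs in docscore:
--             if docs.startswith(query):
--                 querysearch[query].append(docs)
--     for query in querysearch:
--         y=[]
--         scorecalc[query]=[]
--         for docs in querysearch[query]:
--             y.append(int(docscore[docs]))
--         if len(y)==0:
--             scorecalc[query].append(0)
--         else:
--             b=max(y)
--             scorecalc[query].append(b)
--     return scorecalc
-- ===== SOURCE B (Python) =====
-- def autoCompleteScores(title, body, queries):
--     # Combined score per word: 10 per title occurrence + 1 per body occurrence.
--     scores = {}
--     for line in title:
--         for w in line.split():
--             scores[w] = scores.get(w, 0) + 10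
--     for line in body:
--         for w in line.split():
--             scores[w] = scores.get(w, 0) + 1
--     # Prefix index: map every prefix of every word to the max score among
--     # the words carrying that prefix, so each query is a single lookup.
--     best = {}
--     for w, s in scores.items():
--         for i in range(len(w) + 1):
--             p = w[:i]
--             if best.get(p, 0) < s:
--                 best[p] = s
--     return {q: [best.get(q, 0)] for q in queries}
-- ===== Notes on version B (the rewrite author's own statement) =====
-- stated objective: faster
-- what changed: B accumulates word scores in one counting pass and precomputes a prefix->max-score index (a dict over all word prefixes), answering each query by a single O(1) lookup instead of A's repeated count() calls and per-query scan over all words with startswith.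
import Mathlib
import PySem

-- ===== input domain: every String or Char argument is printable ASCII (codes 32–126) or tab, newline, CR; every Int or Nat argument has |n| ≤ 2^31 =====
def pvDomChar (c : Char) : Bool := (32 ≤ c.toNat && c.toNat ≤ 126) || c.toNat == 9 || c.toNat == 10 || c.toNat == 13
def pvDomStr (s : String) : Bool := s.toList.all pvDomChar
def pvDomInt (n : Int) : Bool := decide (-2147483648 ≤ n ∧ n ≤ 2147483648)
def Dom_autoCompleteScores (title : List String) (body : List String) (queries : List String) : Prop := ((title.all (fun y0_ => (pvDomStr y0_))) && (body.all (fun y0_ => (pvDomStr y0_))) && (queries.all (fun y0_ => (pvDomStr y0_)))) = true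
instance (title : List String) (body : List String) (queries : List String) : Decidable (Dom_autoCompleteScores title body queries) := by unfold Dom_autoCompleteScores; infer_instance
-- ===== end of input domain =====

-- B replaces A's per-query scan over all words (and its quadratic count() scoring) by a
-- one-pass score counter and a prefix->max-score dictionary built once, one lookup per query.

-- ===== PORT A =====
def autoCompleteScores (title : List String) (body : List String) (queries : List String) : List (String × List Int) :=
  let docTitles : List String := title.flatMap (fun line => PySem.Str.split₀ line)
  let docBodies : List String := body.flatMap (fun line => PySem.Str.split₀ line)
  let docBodyScore : PySem.Dict String Int :=
    docBodies.foldl (fun d i => d.insert i ((docBodies.count i : Int))) PySem.Dict.empty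
  let docTitleScore : PySem.Dict String Int :=
    docTitles.foldl (fun d i => d.insert i ((docTitles.count i : Int) * 10)) PySem.Dict.empty
  let keyset : PySem.Set String :=
    PySem.Set.union (PySem.Set.ofList docBodyScore.keys) (PySem.Set.ofList docTitleScore.keys)
  let docscore : PySem.Dict String Int :=
    keyset.foldl (fun d k => d.insert k (docBodyScore.getD k 0 + docTitleScore.getD k 0)) PySem.Dict.empty
  let querysearch0 : PySem.Dict String (List String) :=
    queries.foldl (fun d q => d.insert q []) PySem.Dict.empty
  let scorecalc0 : PySem.Dict String (List Int) :=
    queries.foldl (fun d q => d.insert q []) PySem.Dict.empty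
  let querysearch : PySem.Dict String (List String) :=
    querysearch0.keys.foldl (fun qs q =>
      docscore.keys.foldl (fun qs docs =>
        if PySem.Str.startswith docs q then qs.insert q (qs.getD q [] ++ [docs]) else qs) qs)
      querysearch0
  let scorecalc : PySem.Dict String (List Int) :=
    querysearch.keys.foldl (fun sc q =>
      let y : List Int := (querysearch.getD q []).foldl (fun y docs => y ++ [docscore.getD docs 0]) []
      let sc := sc.insert q []
      if y.length == 0 then sc.insert q (sc.getD q [] ++ [0])
      else sc.insert q (sc.getD q [] ++ [(PySem.List.max? y (fun v => v)).getD 0]))  -- y nonempty here, so max? is `some` (Python's max(y))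
      scorecalc0
  scorecalc.items

-- ===== PORT B =====
def autoCompleteScores_alt (title : List String) (body : List String) (queries : List String) : List (String × List Int) :=
  let scores0 : PySem.Dict String Int :=
    title.foldl (fun d line => (PySem.Str.split₀ line).foldl (fun d w => d.insert w (d.getD w 0 + 10)) d) PySem.Dict.empty
  let scores : PySem.Dict String Int :=
    body.foldl (fun d line => (PySem.Str.split₀ line).foldl (fun d w => d.insert w (d.getD w 0 + 1)) d) scores0
  let best : PySem.Dict String Int :=
    scores.items.foldl (fun b ws =>
      (PySem.List.pyRange 0 (PySem.Str.len ws.1 + 1) 1).foldl (fun b i =>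
        let p := PySem.Str.slice ws.1 none (some i)
        if b.getD p 0 < ws.2 then b.insert p ws.2 else b) b)
      PySem.Dict.empty
  (queries.foldl (fun d q => d.insert q [best.getD q 0]) PySem.Dict.empty).items

-- ===== PRECONDITION & SPEC =====
def Spec_autoCompleteScores (title : List String) (body : List String) (queries : List String) (out : List (String × List Int)) : Prop := out = autoCompleteScores_alt title body queries
instance (title : List String) (body : List String) (queries : List String) (out : List (String × List Int)) : Decidable (Spec_autoCompleteScores title body queries out) := by unfold Spec_autoCompleteScores; infer_instance

-- ===== CLAIM (what is proved, stated in full; the proofs are below) =====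
def Claim_equal_autoCompleteScores : Prop := ∀ (title : List String) (body : List String) (queries : List String), Dom_autoCompleteScores title body queries → Spec_autoCompleteScores title body queries (autoCompleteScores title body queries)

-- ===== LEMMAS AND PROOFS =====

-- names of both programs' ingredients (proof-side only)
def pvWords (ls : List String) : List String := ls.flatMap (fun line => PySem.Str.split₀ line)

def pvScore (t b : List String) (w : String) : Int :=
  ((pvWords b).count w : Int) + ((pvWords t).count w : Int) * 10

def pvKeysA (t b : List String) : List String :=
  PySem.Set.union (PySem.Set.ofList (pvWords b)) (PySem.Set.ofList (pvWords t))

def pvKeysB (t b : List String) : List String := PySem.Set.ofList (pvWords t ++ pvWords b)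

def pvValA (t b : List String) (q : String) : List Int :=
  match ((pvKeysA t b).filter (fun w => PySem.Str.startswith w q)).map (pvScore t b) with
  | [] => [0]
  | x :: ts => [ts.foldl max x]

def pvValB (t b : List String) (q : String) : List Int :=
  [((pvKeysB t b).filter (fun w => PySem.Str.startswith w q)).foldl (fun a w => max a (pvScore t b w)) 0]

-- a fold of inserts whose value depends only on the key
lemma pv_getD_foldl_insert_fn {v : Type} (l : List String) (f : String -> v) (d : PySem.Dict String v) (k : String) (d0 : v) :
    (l.foldl (fun d x => d.insert x (f x)) d).getD k d0 = if k ∈ l then f k else d.getD k d0 := by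
  induction l generalizing d with
  | nil => simp
  | cons x t ih =>
    simp only [List.foldl_cons, ih, List.mem_cons]
    by_cases hk : k = x
    · subst hk
      simp [PySem.Dict.getD_insert_self]
    · simp [PySem.Dict.getD_insert, hk]

-- a counting fold adding the constant c per occurrence
lemma pv_getD_foldl_insert_add_const (l : List String) (c : Int) (d : PySem.Dict String Int) (v : String) :
    (l.foldl (fun d w => d.insert w (d.getD w 0 + c)) d).getD v 0 = d.getD v 0 + c * (l.count v : Int) := by
  induction l generalizing d with
  | nil => simp
  | cons x t ih =>
    simp only [List.foldl_cons, ih]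
    by_cases hv : v = x
    · subst hv
      simp [PySem.Dict.getD_insert_self]
      ring
    · simp [PySem.Dict.getD_insert, hv, Ne.symm hv]

-- A's inner collection loop: only key q is touched, gaining the matching docs
lemma pv_inner_getD (K : List String) (q q' : String) (qs : PySem.Dict String (List String)) :
    ((K.foldl (fun qs docs => if PySem.Str.startswith docs q then qs.insert q (qs.getD q [] ++ [docs]) else qs) qs).getD q' [])
      = qs.getD q' [] ++ (if q' = q then K.filter (fun w => PySem.Str.startswith w q) else []) := by
  induction K generalizing qs with
  | nil => simp
  | cons w t ih =>
    simp only [List.foldl_cons, List.filter_cons]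
    by_cases hw : PySem.Str.startswith w q = true
    · rw [if_pos hw, ih]
      rw [PySem.Str.startswith_eq] at hw
      by_cases hq : q' = q
      · subst hq
        simp [PySem.Dict.getD_insert_self, hw]
      · simp [PySem.Dict.getD_insert, hq]
    · rw [if_neg hw, ih]
      rw [PySem.Str.startswith_eq] at hw
      simp [hw]

lemma pv_inner_keys (K : List String) (q : String) (qs : PySem.Dict String (List String)) (h : q ∈ qs.keys) :
    (K.foldl (fun qs docs => if PySem.Str.startswith docs q then qs.insert q (qs.getD q [] ++ [docs]) else qs) qs).keys = qs.keys := by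
  induction K generalizing qs with
  | nil => rfl
  | cons w t ih =>
    simp only [List.foldl_cons]
    by_cases hw : PySem.Str.startswith w q = true
    · rw [if_pos hw, ih]
      · exact PySem.Dict.keys_insert_of_contains _ _ ((PySem.Dict.contains_iff_mem_keys _ _).mpr h)
      · rw [PySem.Dict.mem_keys_insert]; right; exact h
    · rw [if_neg hw, ih _ h]

-- A's querysearch loop over the distinct queries
lemma pv_outer_getD (Q : List String) (K : List String) (qs : PySem.Dict String (List String))
    (hnd : Q.Nodup) (hin : ∀ x ∈ Q, x ∈ qs.keys) (q' : String) :
    ((Q.foldl (fun qs q => K.foldl (fun qs docs => if PySem.Str.startswith docs q then qs.insert q (qs.getD q [] ++ [docs]) else qs) qs) qs).getD q' [])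
      = qs.getD q' [] ++ (if q' ∈ Q then K.filter (fun w => PySem.Str.startswith w q') else []) := by
  induction Q generalizing qs with
  | nil => simp
  | cons q0 t ih =>
    simp only [List.foldl_cons]
    have hnd' := hnd.of_cons
    have hq0 : q0 ∉ t := (List.nodup_cons.mp hnd).1
    rw [ih _ hnd' (fun x hx => by
        rw [pv_inner_keys K q0 qs (hin q0 (List.mem_cons_self))]
        exact hin x (List.mem_cons_of_mem _ hx))]
    rw [pv_inner_getD]
    by_cases hq : q' = q0
    · subst hq
      simp [hq0, List.mem_cons]
    · simp only [List.mem_cons, hq, false_or]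
      by_cases hqt : q' ∈ t <;> simp [hqt]

lemma pv_outer_keys (Q : List String) (K : List String) (qs : PySem.Dict String (List String))
    (hin : ∀ x ∈ Q, x ∈ qs.keys) :
    ((Q.foldl (fun qs q => K.foldl (fun qs docs => if PySem.Str.startswith docs q then qs.insert q (qs.getD q [] ++ [docs]) else qs) qs) qs).keys)
      = qs.keys := by
  induction Q generalizing qs with
  | nil => rfl
  | cons q0 t ih =>
    simp only [List.foldl_cons]
    have hk := pv_inner_keys K q0 qs (hin q0 (List.mem_cons_self))
    rw [ih _ (fun x hx => hk ▸ hin x (List.mem_cons_of_mem _ hx)), hk]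


lemma pv_slice_to_list (w : String) (i : Int) (h0 : (0:Int) ≤ i) :
    (PySem.Str.slice w none (some i)).toList = w.toList.take i.toNat := by
  simp [PySem.Str.slice, PySem.List.slice_to _ h0]

-- B's update of the prefix index by one scored word
lemma pv_prefix_fold_getD (ps : List String) (s : Int) (b : PySem.Dict String Int) (p : String) :
    ((ps.foldl (fun b p' => if b.getD p' 0 < s then b.insert p' s else b) b).getD p 0)
      = if p ∈ ps then max (b.getD p 0) s else b.getD p 0 := by
  induction ps generalizing b with
  | nil => simp
  | cons p0 t ih =>
    simp only [List.foldl_cons, List.mem_cons, ih]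
    by_cases hp : p = p0
    · subst hp
      have hstep : ((if b.getD p 0 < s then b.insert p s else b).getD p 0) = max (b.getD p 0) s := by
        by_cases hlt : b.getD p 0 < s
        · rw [if_pos hlt, PySem.Dict.getD_insert_self]; omega
        · rw [if_neg hlt]; omega
      by_cases hpt : p ∈ t <;> simp [hpt, hstep]
    · have hstep : ((if b.getD p0 0 < s then b.insert p0 s else b).getD p 0) = b.getD p 0 := by
        by_cases hlt : b.getD p0 0 < s
        · rw [if_pos hlt, PySem.Dict.getD_insert, if_neg hp]
        · rw [if_neg hlt]
      simp [hp, hstep]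

-- w[:i] for i in range(len(w)+1) enumerates exactly the prefixes of w
lemma pv_mem_prefixes (w p : String) :
    (p ∈ (PySem.List.pyRange 0 (PySem.Str.len w + 1) 1).map (fun i => PySem.Str.slice w none (some i)))
      ↔ PySem.Str.startswith w p = true := by
  rw [PySem.Str.startswith_eq, PySem.Chars.startswith_iff]
  constructor
  · intro h
    rcases List.mem_map.mp h with ⟨i, hi, rfl⟩
    rw [PySem.List.mem_pyRange_one] at hi
    refine ⟨w.toList.drop i.toNat, ?_⟩
    rw [pv_slice_to_list _ _ hi.1]
    exact List.take_append_drop _ _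
  · intro h
    rw [List.prefix_iff_eq_take] at h
    have hle : p.toList.length ≤ w.toList.length := by
      have := congrArg List.length h
      rw [List.length_take] at this
      omega
    refine List.mem_map.mpr ⟨(p.toList.length : Int), ?_, ?_⟩
    · rw [PySem.List.mem_pyRange_one, PySem.Str.len_eq]
      constructor
      · positivity
      · omega
    · apply String.toList_injective
      rw [pv_slice_to_list _ _ (by positivity)]
      simpa using h.symm

-- B's whole prefix-index build, characterised per key
lemma pv_best_getD (L : List (String × Int)) (b : PySem.Dict String Int) (p : String) :
    ((L.foldl (fun b ws =>
        (PySem.List.pyRange 0 (PySem.Str.len ws.1 + 1) 1).foldl (fun b i =>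
          if b.getD (PySem.Str.slice ws.1 none (some i)) 0 < ws.2
          then b.insert (PySem.Str.slice ws.1 none (some i)) ws.2 else b) b) b).getD p 0)
      = (L.filter (fun ws => PySem.Str.startswith ws.1 p)).foldl (fun a ws => max a ws.2) (b.getD p 0) := by
  induction L generalizing b with
  | nil => simp
  | cons ws t ih =>
    simp only [List.foldl_cons, List.filter_cons, ih]
    have hone : ((PySem.List.pyRange 0 (PySem.Str.len ws.1 + 1) 1).foldl (fun b i =>
          if b.getD (PySem.Str.slice ws.1 none (some i)) 0 < ws.2
          then b.insert (PySem.Str.slice ws.1 none (some i)) ws.2 else b) b).getD p 0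
        = if PySem.Str.startswith ws.1 p then max (b.getD p 0) ws.2 else b.getD p 0 := by
      have := pv_prefix_fold_getD ((PySem.List.pyRange 0 (PySem.Str.len ws.1 + 1) 1).map (fun i => PySem.Str.slice ws.1 none (some i))) ws.2 b p
      rw [List.foldl_map] at this
      rw [this]
      simp only [pv_mem_prefixes]
    rw [hone]
    by_cases hsw : PySem.Str.startswith ws.1 p = true <;>
      rw [PySem.Str.startswith_eq] at hsw <;> simp [hsw]


lemma pv_keys_perm (t b : List String) : (pvKeysA t b).Perm (pvKeysB t b) := by
  rw [List.perm_ext_iff_of_nodup]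
  · intro a
    unfold pvKeysA pvKeysB
    rw [PySem.Set.mem_union, PySem.Set.mem_ofList, PySem.Set.mem_ofList, PySem.Set.mem_ofList,
      List.mem_append]
    tauto
  · exact PySem.Set.nodup_union _ _ (PySem.Set.nodup_ofList _)
  · exact PySem.Set.nodup_ofList _

lemma pv_score_pos (t b : List String) (w : String) (h : w ∈ pvKeysA t b) : 1 ≤ pvScore t b w := by
  unfold pvKeysA at h
  rw [PySem.Set.mem_union, PySem.Set.mem_ofList, PySem.Set.mem_ofList] at h
  unfold pvScore
  rcases h with h | h
  · have := List.count_pos_iff.mpr h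
    omega
  · have := List.count_pos_iff.mpr h
    omega

lemma pv_update_self (s : List String) (l : List String) (h : ∀ x ∈ l, x ∈ s) :
    PySem.Set.update s l = s := by
  rw [PySem.Set.update_eq_append_filter]
  rw [List.filter_eq_nil_iff.mpr, List.append_nil]
  intro a ha
  simp only [PySem.Set.contains, Bool.not_eq_true', Bool.not_eq_false]
  exact List.elem_eq_true_of_mem (h a ((PySem.Set.mem_ofList _ _).mp ha))

lemma pv_items_foldl_insert_fn2 {v : Type} (qs : List String) (f g : String -> v) (d0 : v) :
    ((PySem.Set.ofList qs).foldl (fun d x => d.insert x (f x)) (qs.foldl (fun d x => d.insert x (g x)) PySem.Dict.empty)).items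
      = (PySem.Set.ofList qs).map (fun q => (q, f q)) := by
  have hk0 : ((qs.foldl (fun d x => d.insert x (g x)) PySem.Dict.empty).keys : List String) = PySem.Set.ofList qs := by
    rw [PySem.Dict.keys_foldl_insert (f := fun _ x => g x), PySem.Dict.keys_empty, PySem.Set.update_nil_left]
  have hk : ((PySem.Set.ofList qs).foldl (fun d x => d.insert x (f x)) (qs.foldl (fun d x => d.insert x (g x)) PySem.Dict.empty)).keys = PySem.Set.ofList qs := by
    rw [PySem.Dict.keys_foldl_insert (f := fun _ x => f x), hk0,
      pv_update_self _ _ (fun x hx => hx)]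
  have hnd : ((PySem.Set.ofList qs).foldl (fun d x => d.insert x (f x)) (qs.foldl (fun d x => d.insert x (g x)) PySem.Dict.empty)).keys.Nodup := by
    rw [hk]; exact PySem.Set.nodup_ofList _
  rw [PySem.Dict.items_eq_map_keys _ hnd d0, hk]
  refine List.map_congr_left (fun q hq => ?_)
  rw [pv_getD_foldl_insert_fn, if_pos hq]

lemma pv_items_foldl_insert_fn1 {v : Type} (qs : List String) (f : String -> v) (d0 : v) :
    ((qs.foldl (fun d x => d.insert x (f x)) PySem.Dict.empty)).items
      = (PySem.Set.ofList qs).map (fun q => (q, f q)) := by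
  have hk : ((qs.foldl (fun d x => d.insert x (f x)) PySem.Dict.empty).keys : List String) = PySem.Set.ofList qs := by
    rw [PySem.Dict.keys_foldl_insert (f := fun _ x => f x), PySem.Dict.keys_empty, PySem.Set.update_nil_left]
  have hnd : ((qs.foldl (fun d x => d.insert x (f x)) PySem.Dict.empty).keys : List String).Nodup := by
    rw [hk]; exact PySem.Set.nodup_ofList _
  rw [PySem.Dict.items_eq_map_keys _ hnd d0, hk]
  refine List.map_congr_left (fun q hq => ?_)
  rw [pv_getD_foldl_insert_fn, if_pos ((PySem.Set.mem_ofList _ _).mp hq)]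

lemma pv_scores_items (t b : List String) :
    ((pvWords b).foldl (fun d w => d.insert w (d.getD w 0 + 1))
        ((pvWords t).foldl (fun d w => d.insert w (d.getD w 0 + 10)) (PySem.Dict.empty : PySem.Dict String Int))).items
      = (pvKeysB t b).map (fun w => (w, pvScore t b w)) := by
  have hkT : (((pvWords t).foldl (fun d w => d.insert w (d.getD w 0 + 10)) (PySem.Dict.empty : PySem.Dict String Int)).keys : List String) = PySem.Set.ofList (pvWords t) := by
    rw [PySem.Dict.keys_foldl_insert (f := fun d w => d.getD w 0 + 10), PySem.Dict.keys_empty, PySem.Set.update_nil_left]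
  have hk : (((pvWords b).foldl (fun d w => d.insert w (d.getD w 0 + 1))
        ((pvWords t).foldl (fun d w => d.insert w (d.getD w 0 + 10)) (PySem.Dict.empty : PySem.Dict String Int))).keys : List String) = pvKeysB t b := by
    rw [PySem.Dict.keys_foldl_insert (f := fun d w => d.getD w 0 + 1), hkT, ← PySem.Set.ofList_append]
    rfl
  have hnd : (((pvWords b).foldl (fun d w => d.insert w (d.getD w 0 + 1))
        ((pvWords t).foldl (fun d w => d.insert w (d.getD w 0 + 10)) (PySem.Dict.empty : PySem.Dict String Int))).keys : List String).Nodup := by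
    rw [hk]; unfold pvKeysB; exact PySem.Set.nodup_ofList _
  rw [PySem.Dict.items_eq_map_keys _ hnd 0, hk]
  refine List.map_congr_left (fun w _ => ?_)
  rw [pv_getD_foldl_insert_add_const, pv_getD_foldl_insert_add_const]
  simp only [PySem.Dict.getD_empty]
  unfold pvScore
  ring_nf

-- characterisation of port A's result
lemma pv_A_items (title body queries : List String) :
    autoCompleteScores title body queries
      = (PySem.Set.ofList queries).map (fun q => (q, pvValA title body q)) := by
  simp only [autoCompleteScores]
  rw [show title.flatMap (fun line => PySem.Str.split₀ line) = pvWords title from rfl,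
      show body.flatMap (fun line => PySem.Str.split₀ line) = pvWords body from rfl]
  -- score dicts, always-valid lookups
  have hBS : ∀ k, ((pvWords body).foldl (fun d i => d.insert i ((List.count i (pvWords body) : Nat) : Int)) PySem.Dict.empty).getD k 0
      = ((pvWords body).count k : Int) := by
    intro k
    rw [pv_getD_foldl_insert_fn]
    by_cases hk : k ∈ pvWords body
    · rw [if_pos hk]
    · rw [if_neg hk, PySem.Dict.getD_empty, List.count_eq_zero.mpr hk]
      rfl
  have hTS : ∀ k, ((pvWords title).foldl (fun d i => d.insert i (((List.count i (pvWords title) : Nat) : Int) * 10)) PySem.Dict.empty).getD k 0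
      = ((pvWords title).count k : Int) * 10 := by
    intro k
    rw [pv_getD_foldl_insert_fn]
    by_cases hk : k ∈ pvWords title
    · rw [if_pos hk]
    · rw [if_neg hk, PySem.Dict.getD_empty, List.count_eq_zero.mpr hk]
      simp
  -- the combined key set
  have h1 : (PySem.Set.ofList ((pvWords body).foldl (fun d i => d.insert i ((List.count i (pvWords body) : Nat) : Int)) PySem.Dict.empty).keys).union
        (PySem.Set.ofList ((pvWords title).foldl (fun d i => d.insert i (((List.count i (pvWords title) : Nat) : Int) * 10)) PySem.Dict.empty).keys)
      = pvKeysA title body := by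
    rw [PySem.Dict.keys_foldl_insert (f := fun _ i => ((List.count i (pvWords body) : Nat) : Int)),
        PySem.Dict.keys_foldl_insert (f := fun _ i => (((List.count i (pvWords title) : Nat) : Int) * 10)),
        PySem.Dict.keys_empty]
    rw [PySem.Set.update_nil_left, PySem.Set.update_nil_left,
        PySem.Set.ofList_eq_self_of_nodup _ (PySem.Set.nodup_ofList _),
        PySem.Set.ofList_eq_self_of_nodup _ (PySem.Set.nodup_ofList _)]
    rfl
  rw [h1]
  have h4 : ((queries.foldl (fun d q => d.insert q ([] : List String)) PySem.Dict.empty).keys : List String)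
      = PySem.Set.ofList queries := by
    rw [PySem.Dict.keys_foldl_insert (f := fun _ _ => ([] : List String)), PySem.Dict.keys_empty,
      PySem.Set.update_nil_left]
  rw [h4]
  set BSd := List.foldl (fun d i => d.insert i ((List.count i (pvWords body) : Nat) : Int)) PySem.Dict.empty (pvWords body) with hBSd
  set TSd := List.foldl (fun d i => d.insert i (((List.count i (pvWords title) : Nat) : Int) * 10)) PySem.Dict.empty (pvWords title) with hTSd
  set Dd := List.foldl (fun d k => d.insert k (BSd.getD k 0 + TSd.getD k 0)) PySem.Dict.empty (pvKeysA title body) with hDd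
  -- the score dict: total lookup
  have hD : ∀ k, Dd.getD k 0 = if k ∈ pvKeysA title body then pvScore title body k else 0 := by
    intro k
    rw [hDd, pv_getD_foldl_insert_fn]
    by_cases hk : k ∈ pvKeysA title body
    · rw [if_pos hk, if_pos hk, hBS, hTS]
      rfl
    · rw [if_neg hk, if_neg hk, PySem.Dict.getD_empty]
  have h2 : Dd.keys = pvKeysA title body := by
    rw [hDd, PySem.Dict.keys_foldl_insert (f := fun d k => BSd.getD k 0 + TSd.getD k 0),
      PySem.Dict.keys_empty, PySem.Set.update_nil_left]
    exact PySem.Set.ofList_eq_self_of_nodup _ (PySem.Set.nodup_union _ _ (PySem.Set.nodup_ofList _))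
  rw [h2]
  set qfoldS := List.foldl (fun d q => d.insert q ([] : List String)) PySem.Dict.empty queries with hqfoldS
  have hin : ∀ x ∈ PySem.Set.ofList queries, x ∈ qfoldS.keys := by
    intro x hx
    rw [hqfoldS]
    rw [h4]
    exact hx
  set QSd := List.foldl (fun qs q => List.foldl (fun qs docs => if PySem.Str.startswith docs q = true then qs.insert q (qs.getD q [] ++ [docs]) else qs) qs (pvKeysA title body)) qfoldS (PySem.Set.ofList queries) with hQSd
  have h5 : QSd.keys = PySem.Set.ofList queries := by
    rw [hQSd, pv_outer_keys _ _ _ hin, hqfoldS, h4]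
  rw [h5]
  have hstep : ∀ (sc : PySem.Dict String (List Int)) q, q ∈ PySem.Set.ofList queries →
      (if ((List.foldl (fun y docs => y ++ [Dd.getD docs 0]) [] (QSd.getD q [])).length == 0) = true then
          (sc.insert q []).insert q ((sc.insert q []).getD q [] ++ [0])
        else (sc.insert q []).insert q ((sc.insert q []).getD q [] ++ [(PySem.List.max? (List.foldl (fun y docs => y ++ [Dd.getD docs 0]) [] (QSd.getD q [])) (fun v => v)).getD 0]))
      = sc.insert q (pvValA title body q) := by
    intro sc q hq
    have hQSq : QSd.getD q [] = (pvKeysA title body).filter (fun w => PySem.Str.startswith w q) := by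
      rw [hQSd, pv_outer_getD _ _ _ (PySem.Set.nodup_ofList _) hin, if_pos hq, hqfoldS,
        pv_getD_foldl_insert_fn]
      split_ifs <;> simp
    rw [hQSq, PySem.List.foldl_append_singleton_eq_map, List.nil_append]
    have hmap : ((pvKeysA title body).filter (fun w => PySem.Str.startswith w q)).map (fun docs => Dd.getD docs 0)
        = ((pvKeysA title body).filter (fun w => PySem.Str.startswith w q)).map (pvScore title body) :=
      List.map_congr_left (fun docs hdocs => by
        rw [hD docs, if_pos (List.mem_of_mem_filter hdocs)])
    rw [hmap]
    rcases hS : ((pvKeysA title body).filter (fun w => PySem.Str.startswith w q)).map (pvScore title body) with _ | ⟨x, ts⟩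
    · simp only [List.length_nil]
      rw [PySem.Dict.getD_insert_self, PySem.Dict.insert_insert_self, List.nil_append]
      unfold pvValA
      rw [hS]
      rfl
    · simp only [List.length_cons]
      rw [if_neg (by simp), PySem.List.max?_id_cons]
      rw [PySem.Dict.getD_insert_self, PySem.Dict.insert_insert_self, List.nil_append]
      unfold pvValA
      rw [hS]
      rfl
  rw [PySem.List.foldl_congr_mem (PySem.Set.ofList queries) _
    (fun sc q => sc.insert q (pvValA title body q)) _ hstep]
  exact pv_items_foldl_insert_fn2 queries (pvValA title body) (fun _ => ([] : List Int)) []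

-- characterisation of port B's result
lemma pv_B_items (title body queries : List String) :
    autoCompleteScores_alt title body queries
      = (PySem.Set.ofList queries).map (fun q => (q, pvValB title body q)) := by
  simp only [autoCompleteScores_alt]
  rw [← List.foldl_flatMap (f := fun line => PySem.Str.split₀ line)
        (g := fun (d : PySem.Dict String Int) w => d.insert w (d.getD w 0 + 10)) (l := title),
      ← List.foldl_flatMap (f := fun line => PySem.Str.split₀ line)
        (g := fun (d : PySem.Dict String Int) w => d.insert w (d.getD w 0 + 1)) (l := body)]
  rw [show title.flatMap (fun line => PySem.Str.split₀ line) = pvWords title from rfl,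
      show body.flatMap (fun line => PySem.Str.split₀ line) = pvWords body from rfl]
  rw [pv_scores_items]
  rw [pv_items_foldl_insert_fn1 queries _ ([] : List Int)]
  refine List.map_congr_left (fun q _ => ?_)
  refine congrArg (fun z => (q, z)) ?_
  rw [pv_best_getD, PySem.Dict.getD_empty, List.filter_map, List.foldl_map]
  unfold pvValB
  rfl

-- the per-query values agree: same multiset of matching scores, all scores >= 1
lemma pv_val_eq (t b : List String) (q : String) : pvValA t b q = pvValB t b q := by
  have hperm : (((pvKeysA t b).filter (fun w => PySem.Str.startswith w q)).map (pvScore t b)).Perm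
      (((pvKeysB t b).filter (fun w => PySem.Str.startswith w q)).map (pvScore t b)) :=
    ((pv_keys_perm t b).filter _).map _
  have hB : pvValB t b q
      = [(((pvKeysB t b).filter (fun w => PySem.Str.startswith w q)).map (pvScore t b)).foldl max 0] := by
    unfold pvValB
    rw [List.foldl_map]
  rw [hB]
  unfold pvValA
  rcases hys : ((pvKeysA t b).filter (fun w => PySem.Str.startswith w q)).map (pvScore t b) with _ | ⟨x, ts⟩
  · rw [hys] at hperm
    rw [(hperm.symm.eq_nil)]
    rfl
  · rw [hys] at hperm
    rw [← hperm.foldl_eq 0]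
    have hx : 1 ≤ x := by
      have hmem : x ∈ ((pvKeysA t b).filter (fun w => PySem.Str.startswith w q)).map (pvScore t b) := by
        rw [hys]; exact List.mem_cons_self
      rcases List.mem_map.mp hmem with ⟨w, hw, rfl⟩
      exact pv_score_pos t b w (List.mem_of_mem_filter hw)
    simp only [List.foldl_cons]
    rw [show max (0:Int) x = x by omega]


-- ===== VERDICT (by name: the statement is the Claim_ definition above) =====
theorem autoCompleteScores_spec : Claim_equal_autoCompleteScores := by
  intro title body queries _
  unfold Spec_autoCompleteScores
  rw [pv_A_items, pv_B_items]
  exact List.map_congr_left (fun q _ => by rw [pv_val_eq])
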